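-- pv_equiv track=rewrite | github.com/jbloomAus/SAELens | scripts/huggingface_sae_sync.py | check_path_existence
-- ===== SOURCE A (Python) =====
-- def is_model_file(filepath: str) -> bool:
--     """Check if a filepath has a model file extension."""
--     model_extensions = [".npz", ".safetensors", ".pt", ".json"]
--     return any(filepath.endswith(ext) for ext in model_extensions)
--
-- def is_file_path(path: str) -> bool:
--     """Determine if a path likely points to a file based on model file extensions or structure."""
--     # Check for model file extensions
--     if is_model_file(path):
--         return True
--
--     # If the path ends at a component that looks like a trainer ID (trainer_X)
--     # it's likely a file path even without an extension
--     if path.split("/")[-1].startswith("trainer_"):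
--         return True
--
--     # Check for version tags or other special indicators
--     last_component = path.split("/")[-1]
--     return ":" in last_component or "." in last_component
--
-- def check_path_existence(sae_path: str, huggingface_files: list[str]) -> bool:
--     """
--     Check if a SAELens path exists in HuggingFace files.
--
--     - For exact matches
--     - For paths with different repo prefixes
--     - For trainer directories
--     """
--     # Case 1: Direct match
--     if sae_path in huggingface_files:
--         return True
--
--     # Case 2: Check for paths that might be subpaths or have added prefixes
--     # For example, the HF path might include a main/ or other prefix
--     for file in huggingface_files:
--         # If the file path ends with our sae_path
--         if file.endswith(sae_path):
--             return True
--
--         # If our sae_path ends with the file path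
--         if sae_path.endswith(file):
--             return True
--
--         # If our path is in the middle of a longer path
--         if "/" + sae_path + "/" in "/" + file + "/":
--             return True
--
--     # Case 3: Special handling for trainer paths
--     # If the path ends with trainer_X, check if it's part of a file path
--     if sae_path.split("/")[-1].startswith("trainer_"):
--         trainer_id = sae_path.split("/")[-1]
--         parent_dir = "/".join(sae_path.split("/")[:-1])
--
--         # Check if any file is in this trainer directory
--         for file in huggingface_files:
--             if file.startswith(sae_path + "/") or file.startswith(
--                 parent_dir + "/" + trainer_id + "/"
--             ):
--                 return True
--
--     # Case 4: Check directories
--     if not is_file_path(sae_path):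
--         directory_prefix = sae_path + "/"
--         for file in huggingface_files:
--             if file.startswith(directory_prefix):
--                 return True
--
--     return False
-- ===== SOURCE B (Python) =====
-- def check_path_existence(sae_path: str, huggingface_files: list[str]) -> bool:
--     # One criterion suffices: after wrapping both paths in "/", every case A
--     # distinguishes (exact match, added prefix, trainer directory, directory
--     # prefix) reduces to a suffix test or a wrapped-substring test.
--     wrapped = "/" + sae_path + "/"
--     return any(
--         file.endswith(sae_path)
--         or sae_path.endswith(file)
--         or wrapped in "/" + file + "/"
--         for file in huggingface_files
--     )
-- ===== Notes on version B (the rewrite author's own statement) =====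
-- stated objective: simpler
-- what changed: B drops A's four-stage case analysis (membership, trainer split/join reconstruction, is_file_path directory check) entirely: the trainer and directory startswith tests are provably subsumed by the '/'-wrapped substring test, so B is a single any() over three string tests with no helper functions.
import Mathlib
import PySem

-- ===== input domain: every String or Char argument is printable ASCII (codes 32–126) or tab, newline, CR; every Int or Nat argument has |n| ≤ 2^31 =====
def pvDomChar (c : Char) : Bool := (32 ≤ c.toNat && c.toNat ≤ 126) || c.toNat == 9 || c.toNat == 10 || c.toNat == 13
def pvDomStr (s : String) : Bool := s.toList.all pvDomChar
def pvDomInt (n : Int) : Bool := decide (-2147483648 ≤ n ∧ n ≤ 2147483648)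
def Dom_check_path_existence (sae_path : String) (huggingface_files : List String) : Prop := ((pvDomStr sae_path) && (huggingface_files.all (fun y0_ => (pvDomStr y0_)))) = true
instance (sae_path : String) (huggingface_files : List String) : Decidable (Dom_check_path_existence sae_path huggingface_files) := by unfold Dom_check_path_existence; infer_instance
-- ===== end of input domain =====

-- B replaces A's four-stage case analysis by a single any() of three string tests, the
-- trainer/directory prefix cases being provably subsumed by the '/'-wrapped substring test
-- (objective: simpler).

-- ===== PORT A =====
def is_model_file (filepath : String) : Bool :=
  [".npz", ".safetensors", ".pt", ".json"].any (fun ext => PySem.Str.endswith filepath ext)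

def is_file_path (path : String) : Bool :=
  if is_model_file path then true
  else if PySem.Str.startswith ((((PySem.Str.split? path "/").getD [])).getLast!) "trainer_" then true
  else
    let last_component := (((PySem.Str.split? path "/").getD [])).getLast!
    PySem.Str.isIn ":" last_component || PySem.Str.isIn "." last_component

def check_path_existence (sae_path : String) (huggingface_files : List String) : Bool :=
  -- Case 1: direct match
  if huggingface_files.contains sae_path then true
  -- Case 2: suffix / substring loop
  else if huggingface_files.any (fun file =>
      PySem.Str.endswith file sae_path || PySem.Str.endswith sae_path file ||
      PySem.Str.isIn ("/" ++ sae_path ++ "/") ("/" ++ file ++ "/")) then true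
  -- Case 3: trainer paths
  else if (if PySem.Str.startswith ((((PySem.Str.split? sae_path "/").getD [])).getLast!) "trainer_" then
      huggingface_files.any (fun file =>
        PySem.Str.startswith file (sae_path ++ "/") ||
        PySem.Str.startswith file
          ((PySem.Str.join "/" (((PySem.Str.split? sae_path "/").getD [])).dropLast) ++ "/" ++
           (((PySem.Str.split? sae_path "/").getD [])).getLast! ++ "/"))
    else false) then true
  -- Case 4: directories
  else if !is_file_path sae_path then
    huggingface_files.any (fun file => PySem.Str.startswith file (sae_path ++ "/"))
  else false

-- ===== PORT B =====
def check_path_existence_alt (sae_path : String) (huggingface_files : List String) : Bool :=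
  let wrapped := "/" ++ sae_path ++ "/"
  huggingface_files.any (fun file =>
    PySem.Str.endswith file sae_path || PySem.Str.endswith sae_path file ||
    PySem.Str.isIn wrapped ("/" ++ file ++ "/"))

-- ===== PRECONDITION & SPEC =====
def Spec_check_path_existence (sae_path : String) (huggingface_files : List String) (out : Bool) : Prop := out = check_path_existence_alt sae_path huggingface_files
instance (sae_path : String) (huggingface_files : List String) (out : Bool) : Decidable (Spec_check_path_existence sae_path huggingface_files out) := by unfold Spec_check_path_existence; infer_instance

-- ===== CLAIM =====
def Claim_equal_check_path_existence : Prop := ∀ (sae_path : String) (huggingface_files : List String), Dom_check_path_existence sae_path huggingface_files → Spec_check_path_existence sae_path huggingface_files (check_path_existence sae_path huggingface_files)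

-- ===== LEMMAS AND PROOFS =====


theorem pv_join_append2 (sep a b : List Char) (X : List (List Char)) :
    PySem.Chars.join sep (X ++ [a, b]) = PySem.Chars.join sep (X ++ [a ++ sep ++ b]) := by
  induction X with
  | nil =>
    simp [PySem.Chars.join_cons_cons, PySem.Chars.join_singleton, List.append_assoc]
  | cons x X ih =>
    cases X with
    | nil =>
      simp [PySem.Chars.join_cons_cons, PySem.Chars.join_singleton, List.append_assoc]
    | cons y Y =>
      simp only [List.cons_append] at ih ⊢
      rw [PySem.Chars.join_cons_cons, PySem.Chars.join_cons_cons, ih]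

theorem pv_join_snoc (sep y : List Char) (X : List (List Char)) (h : X ≠ []) :
    PySem.Chars.join sep (X ++ [y]) = PySem.Chars.join sep X ++ sep ++ y := by
  induction X with
  | nil => cases h rfl
  | cons x X ih =>
    cases X with
    | nil => simp [PySem.Chars.join_cons_cons, PySem.Chars.join_singleton]
    | cons z Z =>
      simp only [List.cons_append] at ih ⊢
      rw [PySem.Chars.join_cons_cons, PySem.Chars.join_cons_cons, ih (by simp)]
      simp [List.append_assoc]

theorem pv_go_ne_nil (sep : List Char) (fuel : Nat) (l cur : List Char) (acc : List (List Char)) :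
    PySem.Chars.splitOn.go sep fuel l cur acc ≠ [] := by
  induction fuel generalizing l cur acc with
  | zero => rw [PySem.Chars.splitOn.go.eq_def]; simp
  | succ f ih =>
    rw [PySem.Chars.splitOn.go.eq_def]
    cases l with
    | nil => simp
    | cons c rest =>
      simp only []
      split
      · exact ih _ _ _
      · exact ih _ _ _

theorem pv_go_join (fuel : Nat) (l cur : List Char) (acc : List (List Char))
    (h : l.length < fuel) :
    PySem.Chars.join ['/'] (PySem.Chars.splitOn.go ['/'] fuel l cur acc)
      = PySem.Chars.join ['/'] (acc.reverse ++ [cur.reverse ++ l]) := by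
  induction fuel generalizing l cur acc with
  | zero => omega
  | succ f ih =>
    rw [PySem.Chars.splitOn.go.eq_def]
    cases l with
    | nil => simp
    | cons c rest =>
      by_cases hc : c = '/'
      · subst hc
        simp only [List.isPrefixOf, BEq.rfl, Bool.true_and, List.length_cons, if_true,
          List.length_nil, Nat.zero_add, List.drop_succ_cons, List.drop_zero]
        rw [ih _ _ _ (by simp at h; omega)]
        have h2 := pv_join_append2 ['/'] cur.reverse rest acc.reverse
        simp only [List.reverse_cons, List.reverse_nil, List.nil_append, List.append_assoc,
          List.cons_append, List.nil_append] at h2 ⊢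
        exact h2
      · have hpre : List.isPrefixOf ['/'] (c :: rest) = false := by
          simp [List.isPrefixOf]
          exact fun e => hc e.symm
        simp only [hpre, if_false, Bool.false_eq_true]
        rw [ih _ _ _ (by simp at h; omega)]
        simp

theorem pv_splitOn_join (sL : List Char) :
    PySem.Chars.join ['/'] (PySem.Chars.splitOn sL ['/']) = sL := by
  rw [PySem.Chars.splitOn.eq_def, pv_go_join _ _ _ _ (by omega)]
  simp [PySem.Chars.join_singleton]

theorem pv_splitOn_ne_nil (sL : List Char) : PySem.Chars.splitOn sL ['/'] ≠ [] := by
  rw [PySem.Chars.splitOn.eq_def]; exact pv_go_ne_nil _ _ _ _ _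

theorem pv_getLast!_map (parts : List String) (h : parts ≠ []) :
    (parts.getLast!).toList = (parts.map String.toList).getLast! := by
  induction parts with
  | nil => cases h rfl
  | cons x xs ih =>
    cases xs with
    | nil => rfl
    | cons y ys => simpa using ih (by simp)

theorem pv_dropLast_getLast! {α : Type} [Inhabited α] (l : List α) (h : l ≠ []) :
    l.dropLast ++ [l.getLast!] = l := by
  induction l with
  | nil => cases h rfl
  | cons x xs ih =>
    cases xs with
    | nil => rfl
    | cons y ys => simpa using ih (by simp)

theorem pv_reconstruct (sL : List Char) :
    ('/' :: sL ++ ['/']) <:+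
      ('/' :: (PySem.Chars.join ['/'] (PySem.Chars.splitOn sL ['/']).dropLast
               ++ '/' :: (PySem.Chars.splitOn sL ['/']).getLast! ++ ['/'])) := by
  have hne := pv_splitOn_ne_nil sL
  have hjoin := pv_splitOn_join sL
  have hsplit := pv_dropLast_getLast! (PySem.Chars.splitOn sL ['/']) hne
  by_cases hdl : (PySem.Chars.splitOn sL ['/']).dropLast = []
  · rw [hdl, List.nil_append] at hsplit
    rw [← hsplit, PySem.Chars.join_singleton] at hjoin
    rw [hdl, PySem.Chars.join_nil, hjoin]
    exact ⟨['/'], by simp⟩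
  · rw [← hsplit, pv_join_snoc _ _ _ hdl] at hjoin
    have heq : PySem.Chars.join ['/'] (PySem.Chars.splitOn sL ['/']).dropLast
        ++ '/' :: ((PySem.Chars.splitOn sL ['/']).getLast! ++ ['/']) = sL ++ ['/'] := by
      calc PySem.Chars.join ['/'] (PySem.Chars.splitOn sL ['/']).dropLast
            ++ '/' :: ((PySem.Chars.splitOn sL ['/']).getLast! ++ ['/'])
          = (PySem.Chars.join ['/'] (PySem.Chars.splitOn sL ['/']).dropLast ++ ['/']
              ++ (PySem.Chars.splitOn sL ['/']).getLast!) ++ ['/'] := by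
            simp [List.append_assoc]
        _ = sL ++ ['/'] := by rw [hjoin]
    rw [show (PySem.Chars.join ['/'] (PySem.Chars.splitOn sL ['/']).dropLast
               ++ '/' :: (PySem.Chars.splitOn sL ['/']).getLast! ++ ['/'])
          = PySem.Chars.join ['/'] (PySem.Chars.splitOn sL ['/']).dropLast
               ++ '/' :: ((PySem.Chars.splitOn sL ['/']).getLast! ++ ['/']) by simp, heq]
    exact ⟨[], by simp⟩

theorem pv_key (sL fL pL : List Char)
    (hp : ('/' :: sL ++ ['/']) <:+ ('/' :: pL)) (hf : pL <+: fL) :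
    ('/' :: sL ++ ['/']) <:+: ('/' :: fL ++ ['/']) := by
  obtain ⟨r, hr⟩ := hf
  subst hr
  refine hp.isInfix.trans ?_
  exact ⟨[], r ++ ['/'], by simp⟩

theorem pv_split_some (s : String) :
    ∃ parts : List String, PySem.Str.split? s "/" = some parts ∧
      parts.map String.toList = PySem.Chars.splitOn s.toList ['/'] := by
  have h1 := PySem.Str.split?_map s "/"
  rw [show ("/" : String).toList = ['/'] from rfl, PySem.Chars.split?.eq_def] at h1
  simp only [List.isEmpty_cons, if_false, Bool.false_eq_true] at h1
  cases hs : PySem.Str.split? s "/" with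
  | none => rw [hs] at h1; simp at h1
  | some parts =>
    rw [hs] at h1
    simp only [Option.map_some, Option.some.injEq] at h1
    exact ⟨parts, rfl, h1⟩

theorem pv_case1_sub (s f : String) (h : (s == f) = true) :
    PySem.Str.endswith f s = true := by
  have : s = f := eq_of_beq h
  subst this
  rw [PySem.Str.endswith_eq]
  exact (PySem.Chars.endswith_iff _ _).mpr (List.suffix_refl _)

theorem pv_startswith_sub (s f p : String)
    (hp : ('/' :: s.toList ++ ['/']) <:+ ('/' :: p.toList))
    (h : PySem.Str.startswith f p = true) :
    PySem.Str.isIn ("/" ++ s ++ "/") ("/" ++ f ++ "/") = true := by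
  rw [PySem.Str.isIn_eq]
  have hf : p.toList <+: f.toList := (PySem.Chars.startswith_iff _ _).mp (by
    rw [PySem.Str.startswith_eq] at h; exact h)
  have := pv_key s.toList f.toList p.toList hp hf
  refine (PySem.Chars.isIn_iff_infix _ _).mpr ?_
  simpa [String.toList_append, show ("/" : String).toList = ['/'] from rfl] using this

theorem pv_dir_sub (s f : String) (h : PySem.Str.startswith f (s ++ "/") = true) :
    PySem.Str.isIn ("/" ++ s ++ "/") ("/" ++ f ++ "/") = true := by
  refine pv_startswith_sub s f (s ++ "/") ?_ h
  exact ⟨[], by simp [String.toList_append]⟩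

theorem pv_trainer_sub (s f : String)
    (h : PySem.Str.startswith f
      ((PySem.Str.join "/" (((PySem.Str.split? s "/").getD [])).dropLast) ++ "/" ++
       (((PySem.Str.split? s "/").getD [])).getLast! ++ "/") = true) :
    PySem.Str.isIn ("/" ++ s ++ "/") ("/" ++ f ++ "/") = true := by
  obtain ⟨parts, hsp, hmap⟩ := pv_split_some s
  have hne' : parts ≠ [] := by
    intro e
    rw [e] at hmap
    exact pv_splitOn_ne_nil s.toList hmap.symm
  refine pv_startswith_sub s f _ ?_ h
  have hto : ((PySem.Str.join "/" (((PySem.Str.split? s "/").getD [])).dropLast) ++ "/" ++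
       (((PySem.Str.split? s "/").getD [])).getLast! ++ "/").toList
      = PySem.Chars.join ['/'] (PySem.Chars.splitOn s.toList ['/']).dropLast
               ++ '/' :: (PySem.Chars.splitOn s.toList ['/']).getLast! ++ ['/'] := by
    rw [hsp]
    simp only [Option.getD_some, String.toList_append, PySem.Str.toList_join,
      show ("/" : String).toList = ['/'] from rfl, List.map_dropLast, hmap,
      pv_getLast!_map parts hne', List.append_assoc, List.singleton_append]
  rw [hto]
  exact pv_reconstruct s.toList

theorem pv_absorb (c1 c2 c3 c4 t nf : Bool) (h1 : c1 = true → c2 = true)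
    (h3 : c3 = true → c2 = true) (h4 : c4 = true → c2 = true) :
    (c1 || c2 || (t && c3) || (nf && c4)) = c2 := by
  cases c2
  · cases c1
    · cases c3
      · cases c4
        · cases t <;> cases nf <;> rfl
        · exact absurd (h4 rfl) (by simp)
      · exact absurd (h3 rfl) (by simp)
    · exact absurd (h1 rfl) (by simp)
  · simp

theorem pv_chain (c1 c2 c3 c4 t nf : Bool) :
    (if c1 then true else if c2 then true
     else if (if t then c3 else false) then true
     else if nf then c4 else false)
      = (c1 || c2 || (t && c3) || (nf && c4)) := by
  cases c1 <;> cases c2 <;> cases t <;> cases c3 <;> cases nf <;> cases c4 <;> rfl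

-- ===== VERDICT =====
theorem check_path_existence_spec : Claim_equal_check_path_existence := by
  intro s fs _
  unfold Spec_check_path_existence check_path_existence check_path_existence_alt
  rw [pv_chain]
  refine pv_absorb _ _ _ _ _ _ ?_ ?_ ?_
  · intro h
    rw [List.contains_eq_any_beq] at h
    obtain ⟨f, hmem, hbeq⟩ := List.any_eq_true.mp h
    exact List.any_eq_true.mpr ⟨f, hmem, by
      simp only [pv_case1_sub s f hbeq, Bool.true_or]⟩
  · intro h
    obtain ⟨f, hmem, hor⟩ := List.any_eq_true.mp h
    have hin : PySem.Str.isIn ("/" ++ s ++ "/") ("/" ++ f ++ "/") = true := by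
      cases hd : PySem.Str.startswith f (s ++ "/") with
      | true => exact pv_dir_sub s f hd
      | false => rw [hd, Bool.false_or] at hor; exact pv_trainer_sub s f hor
    exact List.any_eq_true.mpr ⟨f, hmem, by simp only [hin, Bool.or_true]⟩
  · intro h
    obtain ⟨f, hmem, h'⟩ := List.any_eq_true.mp h
    exact List.any_eq_true.mpr ⟨f, hmem, by
      simp only [pv_dir_sub s f h', Bool.or_true]⟩
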